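-- pv_equiv track=rewrite | github.com/TusharRanjanKallo/_Python | program/systemlog1.py | Analyze_logs
-- ===== SOURCE A (Python) =====
-- def Analyze_logs(f):
--     Lcount=0
--     Icount=0
--     Wcount= 0
--     Ecount=0
--     Error_line=[]
--     for line in f:
--         Lcount+=1
--         if "INFO" in line:
--             Icount+=1
--         elif "WARNING" in line:
--             Wcount+=1
--         elif "ERROR" in line:
--             Ecount+=1
--             Error_line.append(line)
--     return Icount,Wcount,Ecount,Error_line,Lcount
-- ===== SOURCE B (Python) =====
-- def Analyze_logs(f):
--     lines = list(f)
--     Icount = sum(1 for l in lines if "INFO" in l)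
--     Wcount = sum(1 for l in lines if "INFO" not in l and "WARNING" in l)
--     Error_line = [l for l in lines
--                   if "INFO" not in l and "WARNING" not in l and "ERROR" in l]
--     return Icount, Wcount, len(Error_line), Error_line, len(lines)
-- ===== Notes on version B (the rewrite author's own statement) =====
-- stated objective: alternative
-- what changed: Replaces the single stateful branching loop with a materialized list and independent per-result scans (counts via generator sums, error lines via one comprehension), replicating the elif priority with negative guards.
import Mathlib
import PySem

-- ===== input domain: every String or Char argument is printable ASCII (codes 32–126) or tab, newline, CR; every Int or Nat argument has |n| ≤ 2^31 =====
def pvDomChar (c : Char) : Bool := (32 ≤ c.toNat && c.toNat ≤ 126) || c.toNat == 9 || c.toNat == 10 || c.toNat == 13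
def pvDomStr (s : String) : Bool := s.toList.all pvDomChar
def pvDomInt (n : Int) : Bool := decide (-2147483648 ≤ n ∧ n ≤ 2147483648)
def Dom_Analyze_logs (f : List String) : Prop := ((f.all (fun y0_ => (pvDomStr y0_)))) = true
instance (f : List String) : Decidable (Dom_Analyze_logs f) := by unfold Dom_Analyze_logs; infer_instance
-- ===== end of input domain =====

-- B replaces A's single stateful branching loop with independent per-result scans over the list (alternative decomposition, same cost).

-- ===== PORT A =====
-- A's loop body: one iteration of 'for line in f' updating (Icount, Wcount, Ecount, Error_line, Lcount)
def analyzeStep (st : Int × Int × Int × List String × Int) (line : String) :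
    Int × Int × Int × List String × Int :=
  let (icount, wcount, ecount, errorLine, lcount) := st
  let lcount := lcount + 1
  if PySem.Str.isIn "INFO" line then (icount + 1, wcount, ecount, errorLine, lcount)
  else if PySem.Str.isIn "WARNING" line then (icount, wcount + 1, ecount, errorLine, lcount)
  else if PySem.Str.isIn "ERROR" line then (icount, wcount, ecount + 1, errorLine ++ [line], lcount)
  else (icount, wcount, ecount, errorLine, lcount)

def Analyze_logs (f : List String) : Int × Int × Int × List String × Int :=
  f.foldl analyzeStep (0, 0, 0, [], 0)

-- ===== PORT B =====
-- independent scans: two counts, one comprehension, two lengths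
def Analyze_logs_alt (f : List String) : Int × Int × Int × List String × Int :=
  let icount : Int := f.countP (fun l => PySem.Str.isIn "INFO" l)
  let wcount : Int := f.countP (fun l => !PySem.Str.isIn "INFO" l && PySem.Str.isIn "WARNING" l)
  let errorLine : List String :=
    f.filter (fun l => !PySem.Str.isIn "INFO" l && !PySem.Str.isIn "WARNING" l && PySem.Str.isIn "ERROR" l)
  (icount, wcount, (errorLine.length : Int), errorLine, (f.length : Int))

-- ===== PRECONDITION & SPEC =====
def Spec_Analyze_logs (f : List String) (out : Int × Int × Int × List String × Int) : Prop := out = Analyze_logs_alt f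
instance (f : List String) (out : Int × Int × Int × List String × Int) : Decidable (Spec_Analyze_logs f out) := by unfold Spec_Analyze_logs; infer_instance

-- ===== CLAIM (what is proved, stated in full; the proofs are below) =====
def Claim_equal_Analyze_logs : Prop := ∀ (f : List String), Dom_Analyze_logs f → Spec_Analyze_logs f (Analyze_logs f)

-- ===== LEMMAS AND PROOFS =====
-- invariant: A's fold from any accumulator adds B's per-result scans componentwise
theorem analyze_fold_general (f : List String) (i w e : Int) (errs : List String) (l : Int) :
    f.foldl analyzeStep (i, w, e, errs, l) =
    (i + f.countP (fun s => PySem.Str.isIn "INFO" s),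
     w + f.countP (fun s => !PySem.Str.isIn "INFO" s && PySem.Str.isIn "WARNING" s),
     e + ((f.filter (fun s => !PySem.Str.isIn "INFO" s && !PySem.Str.isIn "WARNING" s && PySem.Str.isIn "ERROR" s)).length : Int),
     errs ++ f.filter (fun s => !PySem.Str.isIn "INFO" s && !PySem.Str.isIn "WARNING" s && PySem.Str.isIn "ERROR" s),
     l + (f.length : Int)) := by
  induction f generalizing i w e errs l with
  | nil => simp
  | cons x xs ih =>
    rw [List.foldl_cons]
    by_cases hI : PySem.Str.isIn "INFO" x <;>
      by_cases hW : PySem.Str.isIn "WARNING" x <;>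
        by_cases hE : PySem.Str.isIn "ERROR" x <;>
          simp only [analyzeStep, hI, hW, hE, if_true, if_false, Bool.false_eq_true, ite_true,
            ite_false, List.countP_cons, List.filter_cons, List.length_cons, Bool.not_true,
            Bool.not_false, Bool.true_and, Bool.false_and, Bool.and_true, Bool.and_false,
            ih, Prod.mk.injEq, Nat.cast_add, Nat.cast_one] <;>
          and_intros <;> first
            | (push_cast; ring)
            | simp [List.append_assoc]
            | trivial

-- ===== VERDICT (by name: the statement is the Claim_ definition above) =====
theorem Analyze_logs_spec : Claim_equal_Analyze_logs := by
  intro f _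
  unfold Spec_Analyze_logs Analyze_logs Analyze_logs_alt
  rw [analyze_fold_general]
  simp
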